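-- pv_equiv track=rewrite | github.com/gigo-gigo/atcoder | abc/abc428/c.py | solve
-- ===== SOURCE A (Python) =====
-- def solve(queries):
--     ans = []
--     lifo = []
--     x = 0
--     is_good = True
--
--     for q, c in queries:
--         if q == 1:
--             dx = 1 if c == "(" else -1
--             if is_good and x == 0 and dx == -1:
--                 is_good = False
--                 lifo.append((c, True))
--             else:
--                 lifo.append((c, False))
--             x += dx
--         else:
--             c, f = lifo.pop()
--             if c == "(":
--                 x -= 1
--             else:
--                 x += 1
--             if f:
--                 is_good = True
--
--         if is_good and x == 0:
--             ans.append("Yes")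
--         else:
--             ans.append("No")
--
--     return ans
-- ===== SOURCE B (Python) =====
-- def solve(queries):
--     ans = []
--     st = []  # each entry: (balance after this push, min prefix balance so far)
--     for q, c in queries:
--         if q == 1:
--             pb, pm = st[-1] if st else (0, 0)
--             nb = pb + (1 if c == "(" else -1)
--             st.append((nb, min(pm, nb)))
--         else:
--             st.pop()
--         b, m = st[-1] if st else (0, 0)
--         ans.append("Yes" if b == 0 and m >= 0 else "No")
--     return ans
-- ===== Notes on version B (the rewrite author's own statement) =====
-- stated objective: simpler
-- what changed: Replaces A's is_good flag plus per-element anchor-flag bookkeeping with a stack whose entries store (balance, running prefix minimum); validity is read off the top as balance==0 and min>=0, with no conditional flag logic.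
import Mathlib
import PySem

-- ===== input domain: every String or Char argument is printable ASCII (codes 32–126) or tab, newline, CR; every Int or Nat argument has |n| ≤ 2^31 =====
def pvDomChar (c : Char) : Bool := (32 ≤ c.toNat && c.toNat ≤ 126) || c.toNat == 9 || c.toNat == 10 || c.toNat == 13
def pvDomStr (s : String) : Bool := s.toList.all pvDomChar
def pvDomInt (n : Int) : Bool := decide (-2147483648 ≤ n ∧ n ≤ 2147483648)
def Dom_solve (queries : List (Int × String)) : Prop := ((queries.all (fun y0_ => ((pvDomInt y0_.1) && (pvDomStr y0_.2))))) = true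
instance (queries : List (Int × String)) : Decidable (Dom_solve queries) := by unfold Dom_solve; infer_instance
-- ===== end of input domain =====

-- B replaces A's is_good flag / per-element anchor-flag bookkeeping with a stack of
-- (balance, running prefix minimum) pairs read off arithmetically; same cost, plainer invariant.

-- ===== PORT A =====
-- state: remaining queries, lifo (top first), x, is_good; a pop of an empty lifo is a
-- Python IndexError (excluded by Pre_solve); the port returns [] there.
def solveGo : List (Int × String) → List (String × Bool) → Int → Bool → List String
  | [], _, _, _ => []
  | (q, c) :: rest, lifo, x, good =>
    if q == 1 then
      let dx : Int := if c == "(" then 1 else -1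
      let anchor := good && x == 0 && dx == -1
      let good' := if anchor then false else good
      let x' := x + dx
      (if good' && x' == 0 then "Yes" else "No") :: solveGo rest ((c, anchor) :: lifo) x' good'
    else
      match lifo with
      | [] => []
      | (c2, f) :: lifo' =>
        let x' := if c2 == "(" then x - 1 else x + 1
        let good' := if f then true else good
        (if good' && x' == 0 then "Yes" else "No") :: solveGo rest lifo' x' good'

def solve (queries : List (Int × String)) : List String := solveGo queries [] 0 true

-- ===== PORT B =====
-- state: remaining queries, stack of (balance, running prefix minimum), top first.
def solveAltGo : List (Int × String) → List (Int × Int) → List String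
  | [], _ => []
  | (q, c) :: rest, st =>
    if q == 1 then
      let p := st.headD (0, 0)
      let nb := p.1 + (if c == "(" then 1 else -1)
      let st' := (nb, min p.2 nb) :: st
      (if nb == 0 && decide (0 ≤ min p.2 nb) then "Yes" else "No") :: solveAltGo rest st'
    else
      match st with
      | [] => []
      | _ :: st' =>
        let t := st'.headD (0, 0)
        (if t.1 == 0 && decide (0 ≤ t.2) then "Yes" else "No") :: solveAltGo rest st'

def solve_alt (queries : List (Int × String)) : List String := solveAltGo queries []

-- ===== PRECONDITION & SPEC =====
-- Pre_solve excludes exactly the inputs on which Python A raises IndexError: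
-- a pop (q ≠ 1) performed while the stack is empty, i.e. some prefix has more pops than pushes.
def Pre_solve (queries : List (Int × String)) : Prop :=
  ∀ p ∈ queries.inits,
    (p.filter (fun qc => !(qc.1 == 1))).length ≤ (p.filter (fun qc => qc.1 == 1)).length
instance (queries : List (Int × String)) : Decidable (Pre_solve queries) := by
  unfold Pre_solve; infer_instance

def pvWitness_solve : (List (Int × String)) := [(1, "("), (1, ")"), (2, ""), (2, "x")]

def Spec_solve (queries : List (Int × String)) (out : List String) : Prop := out = solve_alt queries
instance (queries : List (Int × String)) (out : List String) : Decidable (Spec_solve queries out) := by unfold Spec_solve; infer_instance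

-- ===== CLAIM (what is proved, stated in full; the proofs are below) =====
def Claim_equal_solve : Prop := ∀ (queries : List (Int × String)), Dom_solve queries → Pre_solve queries → Spec_solve queries (solve queries)

-- ===== LEMMAS AND PROOFS =====

-- Invariant tying A's stack (char, anchor flag) to B's stack (balance, prefix min).
inductive ABRel : List (String × Bool) → List (Int × Int) → Prop
  | nil : ABRel [] []
  | cons (c : String) (L : List (String × Bool)) (S : List (Int × Int))
      (h : ABRel L S) :
      ABRel ((c, decide (0 ≤ (S.headD (0, 0)).2) && (S.headD (0, 0)).1 == 0 &&
              ((if c == "(" then (1 : Int) else -1) == -1)) :: L)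
          (((S.headD (0, 0)).1 + (if c == "(" then 1 else -1),
            min (S.headD (0, 0)).2 ((S.headD (0, 0)).1 + (if c == "(" then 1 else -1))) :: S)

theorem rel_head_le : ∀ {L S}, ABRel L S → (S.headD (0, 0)).2 ≤ (S.headD (0, 0)).1 := by
  intro L S h
  cases h with
  | nil => simp
  | cons c L S h => simp only [List.headD_cons]; exact min_le_right _ _

theorem go_eq : ∀ (qs : List (Int × String)) (L : List (String × Bool)) (S : List (Int × Int))
    (x : Int) (g : Bool), ABRel L S →
    x = (S.headD (0, 0)).1 → g = decide (0 ≤ (S.headD (0, 0)).2) →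
    solveGo qs L x g = solveAltGo qs S := by
  intro qs
  induction qs with
  | nil => intro L S x g _ _ _; rfl
  | cons qc rest ih =>
    intro L S x g hrel hx hg
    obtain ⟨q, c⟩ := qc
    have hle := rel_head_le hrel
    set b := (S.headD (0, 0)).1 with hbdef
    set m := (S.headD (0, 0)).2 with hmdef
    subst hx hg
    by_cases hq : (q == 1) = true
    · -- push branch
      by_cases hc : (c == "(") = true
      · -- dx = 1, the anchor condition is false
        have hrelp : ABRel ((c, false) :: L) ((b + 1, min m (b + 1)) :: S) := by
          have hcns := ABRel.cons c L S hrel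
          rw [← hbdef, ← hmdef] at hcns
          simpa [hc] using hcns
        have h2 := ih ((c, false) :: L) ((b + 1, min m (b + 1)) :: S) (b + 1)
          (decide (0 ≤ m)) hrelp rfl
          (by simp only [List.headD_cons]; rw [decide_eq_decide]; omega)
        simp only [solveGo, solveAltGo, hq, hc, if_pos]
        have hanc : (decide (0 ≤ m) && b == 0 && ((1 : Int) == -1)) = false := by simp
        rw [hanc]
        simp only [Bool.false_eq_true, if_false]
        simp only [← hbdef, ← hmdef]
        rw [h2]
        congr 1
        refine if_congr ?_ rfl rfl
        simp only [Bool.and_eq_true, beq_iff_eq, decide_eq_true_eq]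
        omega
      · -- dx = -1
        have hrelm : ABRel ((c, decide (0 ≤ m) && b == 0) :: L)
            ((b + -1, min m (b + -1)) :: S) := by
          have hcns := ABRel.cons c L S hrel
          rw [← hbdef, ← hmdef] at hcns
          simpa [hc] using hcns
        simp only [solveGo, solveAltGo, hq, hc, if_true, Bool.false_eq_true, if_false,
          show ((-1 : Int) == -1) = true from by decide, Bool.and_true]
        simp only [← hbdef, ← hmdef]
        by_cases hanc : (decide (0 ≤ m) && b == 0) = true
        · -- anchored push of a ')': is_good falls to false
          have hp : 0 ≤ m ∧ b = 0 := by simpa using hanc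
          have hrelm' : ABRel ((c, true) :: L) ((b + -1, min m (b + -1)) :: S) := by
            rwa [hanc] at hrelm
          have h2 := ih ((c, true) :: L) ((b + -1, min m (b + -1)) :: S) (b + -1)
            false hrelm' rfl
            (by simp only [List.headD_cons]
                have hmr := min_le_right m (b + -1)
                symm
                rw [decide_eq_false_iff_not]
                omega)
          rw [hanc]
          simp only [if_true]
          rw [h2]
          simp [hp.2]
        · -- un-anchored push of a ')'
          rw [Bool.not_eq_true] at hanc
          have hside : ¬(0 ≤ m ∧ b = 0) := by intro hh; simp [hh.1, hh.2] at hanc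
          have hrelm' : ABRel ((c, false) :: L) ((b + -1, min m (b + -1)) :: S) := by
            rwa [hanc] at hrelm
          have h2 := ih ((c, false) :: L) ((b + -1, min m (b + -1)) :: S) (b + -1)
            (decide (0 ≤ m)) hrelm' rfl
            (by simp only [List.headD_cons]; rw [decide_eq_decide]; omega)
          rw [hanc]
          simp only [Bool.false_eq_true, if_false]
          rw [h2]
          congr 1
          refine if_congr ?_ rfl rfl
          simp only [Bool.and_eq_true, beq_iff_eq, decide_eq_true_eq]
          omega
    · -- pop branch
      cases hrel with
      | nil => simp only [solveGo, solveAltGo, hq, Bool.false_eq_true, if_false]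
      | cons c2 L' S' h' =>
        have hle' := rel_head_le h'
        rw [hbdef, hmdef]
        simp only [List.headD_cons]
        simp only [solveGo, solveAltGo, hq, Bool.false_eq_true, if_false]
        set b0 := (S'.headD (0, 0)).1 with hb0
        set m0 := (S'.headD (0, 0)).2 with hm0
        by_cases hc : (c2 == "(") = true
        · -- popped a '(' : its flag is false, balance returns to b0
          simp only [hc, if_true, show ((1 : Int) == -1) = false from by decide,
            Bool.and_false, Bool.false_eq_true, if_false]
          rw [show b0 + 1 - 1 = b0 from by omega]
          rw [show decide (0 ≤ min m0 (b0 + 1)) = decide (0 ≤ m0) from by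
            rw [decide_eq_decide]; omega]
          rw [ih L' S' b0 (decide (0 ≤ m0)) h' hb0 (by rw [hm0])]
          congr 1
          refine if_congr ?_ rfl rfl
          simp only [Bool.and_eq_true, beq_iff_eq, decide_eq_true_eq]
          omega
        · -- popped a ')' : balance rises back to b0
          simp only [hc, Bool.false_eq_true, if_false,
            show ((-1 : Int) == -1) = true from by decide, Bool.and_true]
          rw [show b0 + -1 + 1 = b0 from by omega]
          by_cases hanc : (decide (0 ≤ m0) && b0 == 0) = true
          · -- anchored element: popping it restores is_good
            have hp : 0 ≤ m0 ∧ b0 = 0 := by simpa using hanc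
            rw [hanc]
            simp only [if_true]
            rw [ih L' S' b0 true h' hb0 (by rw [← hm0]; simp [hp.1])]
            congr 1
            refine if_congr ?_ rfl rfl
            simp only [Bool.true_and, Bool.and_eq_true, beq_iff_eq, decide_eq_true_eq]
            omega
          · rw [Bool.not_eq_true] at hanc
            have hside : ¬(0 ≤ m0 ∧ b0 = 0) := by intro hh; simp [hh.1, hh.2] at hanc
            rw [hanc]
            simp only [Bool.false_eq_true, if_false]
            rw [show decide (0 ≤ min m0 (b0 + -1)) = decide (0 ≤ m0) from by
              rw [decide_eq_decide]; omega]
            rw [ih L' S' b0 (decide (0 ≤ m0)) h' hb0 (by rw [hm0])]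
            congr 1
            refine if_congr ?_ rfl rfl
            simp only [Bool.and_eq_true, beq_iff_eq, decide_eq_true_eq]
            omega

-- ===== VERDICT (by name: the statement is the Claim_ definition above) =====
theorem solve_spec : Claim_equal_solve := by
  intro queries _ _
  unfold Spec_solve solve solve_alt
  exact go_eq queries [] [] 0 true ABRel.nil rfl rfl
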